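-- pv_equiv track=rewrite | github.com/deepcell/mavropoulos_2022 | pipeline/askcell/utils/stringutils.py | trim_common_suffixes
-- ===== SOURCE A (Python) =====
-- from typing import Iterator, Sequence
--
-- def trim_common_suffixes(strs: Sequence[str], max_trim: int | None = None) -> tuple[str, list[str]]:
--     """Trim common suffixes from a list of strings.
--
--     Args:
--         strs: list of strings
--         max_trim: maximum length common suffix to trim; default None is unlimited length
--
--     Returns:
--         tuple of common suffix and suffix-trimmed list of strings
--
--     Examples:
--         >>> trim_common_suffixes([])
--         ('', [])
--         >>> trim_common_suffixes(['AA'])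
--         ('', ['AA'])
--         >>> trim_common_suffixes(['A','BA'])
--         ('A', ['', 'B'])
--         >>> trim_common_suffixes(['A','AB'])
--         ('', ['A', 'AB'])
--         >>> trim_common_suffixes(['A','BA','BAAA'])
--         ('A', ['', 'B', 'BAA'])
--         >>> trim_common_suffixes(['BA','ABA','AABA'])
--         ('BA', ['', 'A', 'AA'])
--         >>> trim_common_suffixes(['AB','ABA','ABAA','C'])
--         ('', ['AB', 'ABA', 'ABAA', 'C'])
--         >>> trim_common_suffixes(['AAAAAAAAA','AAAAAAAAA','AAAAAAAAA','AAAAAAAAA'])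
--         ('AAAAAAAAA', ['', '', '', ''])
--         >>> trim_common_suffixes(['BAAAAAAAAA','CAAAAAAAAA','DAAAAAAAAA','AAAAAAAAA'])
--         ('AAAAAAAAA', ['B', 'C', 'D', ''])
--
--     """
--     if not isinstance(strs, list):
--         strs = list(strs)
--
--     if len(strs) < 2:
--         return "", strs
--
--     istrs = iter(strs)
--     first = next(istrs)
--     trim = len(first)
--
--     for s in istrs:
--         trim = min(trim, len(s))
--         i = -1
--         while i >= -trim and first[i] == s[i]:
--             i -= 1
--         trim = -i - 1
--         if not trim:
--             break
--
--     if not trim: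
--         return "", strs
--
--     if max_trim is not None and trim > max_trim:
--         trim = max_trim
--
--     return first[-trim:], [s[:-trim] for s in strs]
-- ===== SOURCE B (Python) =====
-- def trim_common_suffixes(strs, max_trim=None):
--     """Trim common suffixes, computed column-wise from the right."""
--     if not isinstance(strs, list):
--         strs = list(strs)
--
--     if len(strs) < 2:
--         return "", strs
--
--     first = strs[0]
--     limit = min(len(s) for s in strs)
--     trim = 0
--     for i in range(1, limit + 1):
--         if all(s[-i] == first[-i] for s in strs):
--             trim = i
--         else:
--             break
--
--     if not trim:
--         return "", strs
--
--     if max_trim is not None and trim > max_trim: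
--         trim = max_trim
--
--     return first[-trim:], [s[:-trim] for s in strs]
-- ===== Notes on version B (the rewrite author's own statement) =====
-- stated objective: alternative
-- what changed: B replaces A's per-string inner while-loops (re-scanning the suffix pairwise against the first string with a running minimum) by a single column-wise pass: it precomputes the minimum length once and walks suffix positions 1..limit, checking all strings per column and stopping at the first disagreeing column.
import Mathlib
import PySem

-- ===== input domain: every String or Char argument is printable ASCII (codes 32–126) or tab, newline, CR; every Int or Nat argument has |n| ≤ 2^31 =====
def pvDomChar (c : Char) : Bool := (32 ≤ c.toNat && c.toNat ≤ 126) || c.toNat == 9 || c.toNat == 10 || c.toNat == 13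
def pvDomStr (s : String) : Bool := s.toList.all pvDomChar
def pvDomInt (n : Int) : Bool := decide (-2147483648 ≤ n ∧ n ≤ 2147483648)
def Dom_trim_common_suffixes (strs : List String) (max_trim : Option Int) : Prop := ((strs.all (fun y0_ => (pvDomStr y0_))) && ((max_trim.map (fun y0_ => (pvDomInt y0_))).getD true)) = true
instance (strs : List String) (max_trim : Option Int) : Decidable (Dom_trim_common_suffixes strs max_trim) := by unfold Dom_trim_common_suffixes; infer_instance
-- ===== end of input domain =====

-- B recomputes the common-suffix length column-wise (one pass over suffix
-- positions, checking all strings per column) instead of A's per-string pairwise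
-- while-loops; objective: alternative decomposition, same exact behaviour.

-- ===== PORT A =====
-- the inner 'while i >= -trim and first[i] == s[i]: i -= 1' of A
def pvWhileA (first s : String) (trim : Int) (i : Int) : Int :=
  if h : -trim ≤ i ∧ PySem.Str.pyGet? first i = PySem.Str.pyGet? s i then
    pvWhileA first s trim (i - 1)
  else i
termination_by (i + trim + 1).toNat
decreasing_by omega

-- one iteration of A's 'for s in istrs' loop; 'if trim = 0 then trim' encodes
-- the 'if not trim: break' of the previous iteration (further iterations keep 0)
def pvStepA (first : String) (trim : Int) (s : String) : Int :=
  if trim = 0 then trim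
  else
    let trim1 := min trim (PySem.Str.len s)
    let i := pvWhileA first s trim1 (-1);
    -i - 1

def trim_common_suffixes (strs : List String) (max_trim : Option Int) : String × List String :=
  if strs.length < 2 then ("", strs)
  else
    match strs with
    | [] => ("", strs)  -- unreachable: length ≥ 2
    | first :: rest =>
      let trim := rest.foldl (pvStepA first) (PySem.Str.len first)
      if trim = 0 then ("", strs)
      else
        let trim := match max_trim with
          | some m => if m < trim then m else trim
          | none => trim
        (PySem.Str.slice first (some (-trim)) none,
         strs.map (fun s => PySem.Str.slice s none (some (-trim))))

-- ===== PORT B =====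
-- B's 'for i in range(1, limit+1): if all(s[-i] == first[-i] ...) then trim = i else break'
def pvColLoopB (strs : List String) (first : String) (limit : Int) (i : Int) (trim : Int) : Int :=
  if h : i ≤ limit then
    if strs.all (fun s => PySem.Str.pyGet? s (-i) == PySem.Str.pyGet? first (-i)) then
      pvColLoopB strs first limit (i + 1) i
    else trim
  else trim
termination_by (limit + 1 - i).toNat
decreasing_by omega

def trim_common_suffixes_alt (strs : List String) (max_trim : Option Int) : String × List String :=
  if strs.length < 2 then ("", strs)
  else
    match strs with
    | [] => ("", strs)  -- unreachable: length ≥ 2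
    | first :: _ =>
      -- min(len(s) for s in strs); the .getD default is unreachable (strs ≠ [])
      let limit := (PySem.List.min? (strs.map PySem.Str.len) (fun x => x)).getD 0
      let trim := pvColLoopB strs first limit 1 0
      if trim = 0 then ("", strs)
      else
        let trim := match max_trim with
          | some m => if m < trim then m else trim
          | none => trim
        (PySem.Str.slice first (some (-trim)) none,
         strs.map (fun s => PySem.Str.slice s none (some (-trim))))

-- ===== PRECONDITION & SPEC =====
def Spec_trim_common_suffixes (strs : List String) (max_trim : Option Int) (out : String × List String) : Prop := out = trim_common_suffixes_alt strs max_trim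
instance (strs : List String) (max_trim : Option Int) (out : String × List String) : Decidable (Spec_trim_common_suffixes strs max_trim out) := by unfold Spec_trim_common_suffixes; infer_instance

-- ===== CLAIM (what is proved, stated in full; the proofs are below) =====
def Claim_equal_trim_common_suffixes : Prop := ∀ (strs : List String) (max_trim : Option Int), Dom_trim_common_suffixes strs max_trim → Spec_trim_common_suffixes strs max_trim (trim_common_suffixes strs max_trim)

-- ===== LEMMAS AND PROOFS =====

-- common prefix length of two char lists (applied to REVERSED strings = common suffix)
def cpl : List Char → List Char → Nat
  | a :: as, b :: bs => if a = b then cpl as bs + 1 else 0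
  | _, _ => 0

lemma cpl_le_right (a b : List Char) : cpl a b ≤ b.length := by
  induction a generalizing b with
  | nil => simp [cpl]
  | cons x as ih =>
    cases b with
    | nil => simp [cpl]
    | cons y bs =>
      simp only [cpl, List.length_cons]
      split_ifs
      · have := ih bs; omega
      · omega

lemma cpl_get (a b : List Char) (j : Nat) (h : j < cpl a b) : a[j]? = b[j]? := by
  induction a generalizing b j with
  | nil => simp [cpl] at h
  | cons x as ih =>
    cases b with
    | nil => simp [cpl] at h
    | cons y bs =>
      simp only [cpl] at h
      split_ifs at h with hxy
      · cases j with
        | zero => simp [hxy]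
        | succ j' => simpa using ih bs j' (by omega)
      · omega

lemma cpl_ne (a b : List Char) (h1 : cpl a b < a.length) (h2 : cpl a b < b.length) :
    a[cpl a b]? ≠ b[cpl a b]? := by
  induction a generalizing b with
  | nil => simp at h1
  | cons x as ih =>
    cases b with
    | nil => simp at h2
    | cons y bs =>
      by_cases hxy : x = y
      · have hc : cpl (x :: as) (y :: bs) = cpl as bs + 1 := by simp [cpl, hxy]
        rw [hc] at h1 h2 ⊢
        simpa using ih bs (by simpa using h1) (by simpa using h2)
      · have hc : cpl (x :: as) (y :: bs) = 0 := by simp [cpl, hxy]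
        rw [hc]
        simpa using hxy

lemma pyGet_neg_rev (xs : List Char) (k : Nat) (h : k < xs.length) :
    PySem.List.pyGet? xs (-(k : Int) - 1) = xs.reverse[k]? := by
  have h1 : (-(k : Int) - 1) = -((k + 1 : Nat) : Int) := by push_cast; ring
  rw [h1, PySem.List.pyGet?_neg_natCast xs (k + 1) (by omega) (by omega),
      List.getElem?_reverse h]
  congr 1
  omega

-- characterisation of A's inner while loop, from any already-matched depth k
lemma pvWhileA_spec (f s : String) (t : Nat)
    (htf : t ≤ f.toList.length) (hts : t ≤ s.toList.length) :
    ∀ d k, k ≤ min t (cpl f.toList.reverse s.toList.reverse) →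
      min t (cpl f.toList.reverse s.toList.reverse) - k ≤ d →
      pvWhileA f s (t : Int) (-(k : Int) - 1)
        = -((min t (cpl f.toList.reverse s.toList.reverse) : Nat) : Int) - 1 := by
  set F := f.toList.reverse with hF
  set S := s.toList.reverse with hS
  set M := min t (cpl F S) with hM
  have hFl : F.length = f.toList.length := by simp [hF]
  have hSl : S.length = s.toList.length := by simp [hS]
  have hexit : ∀ k, k = M →
      ¬(-(t : Int) ≤ -(k : Int) - 1 ∧
        PySem.Str.pyGet? f (-(k : Int) - 1) = PySem.Str.pyGet? s (-(k : Int) - 1)) := by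
    intro k hkM
    rintro ⟨hle, heq⟩
    have hkt : k < t := by omega
    have hkc : cpl F S = k := by omega
    have hne : F[k]? ≠ S[k]? := by
      have := cpl_ne F S (by omega) (by omega)
      rwa [hkc] at this
    apply hne
    rw [PySem.Str.pyGet?_eq, PySem.Str.pyGet?_eq, PySem.Chars.pyGet?_eq_listPyGet?,
        PySem.Chars.pyGet?_eq_listPyGet?,
        pyGet_neg_rev f.toList k (by omega), pyGet_neg_rev s.toList k (by omega)] at heq
    exact heq
  intro d
  induction d with
  | zero =>
    intro k hk hd
    have hkM : k = M := by omega
    rw [pvWhileA, dif_neg (hexit k hkM)]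
    omega
  | succ d' ih =>
    intro k hk hd
    by_cases hkM : k = M
    · rw [pvWhileA, dif_neg (hexit k hkM)]
      omega
    · have hklt : k < M := by omega
      have heq : F[k]? = S[k]? := cpl_get F S k (by omega)
      have hcond : -(t : Int) ≤ -(k : Int) - 1 ∧
          PySem.Str.pyGet? f (-(k : Int) - 1) = PySem.Str.pyGet? s (-(k : Int) - 1) := by
        refine ⟨by omega, ?_⟩
        rw [PySem.Str.pyGet?_eq, PySem.Str.pyGet?_eq, PySem.Chars.pyGet?_eq_listPyGet?,
            PySem.Chars.pyGet?_eq_listPyGet?,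
            pyGet_neg_rev f.toList k (by omega), pyGet_neg_rev s.toList k (by omega)]
        exact heq
      rw [pvWhileA, dif_pos hcond]
      have harith : (-(k : Int) - 1 - 1) = -((k + 1 : Nat) : Int) - 1 := by push_cast; ring
      rw [harith]
      exact ih (k + 1) (by omega) (by omega)

lemma pvStepA_spec (first s : String) (n : Nat) (hn : n ≤ first.toList.length) :
    pvStepA first (n : Int) s
      = ((min n (cpl first.toList.reverse s.toList.reverse) : Nat) : Int) := by
  unfold pvStepA
  by_cases h0 : n = 0
  · subst h0; simp
  · rw [if_neg (by exact_mod_cast h0)]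
    have hmin : min (n : Int) (PySem.Str.len s) = ((min n s.toList.length : Nat) : Int) := by
      rw [PySem.Str.len_eq]; omega
    show -(pvWhileA first s (min (n : Int) (PySem.Str.len s)) (-1)) - 1 = _
    rw [hmin]
    have hw := pvWhileA_spec first s (min n s.toList.length) (by omega) (by omega)
        (min (min n s.toList.length) (cpl first.toList.reverse s.toList.reverse)) 0
        (by omega) (by omega)
    rw [show (-1 : Int) = -((0 : Nat) : Int) - 1 from by norm_num, hw]
    have hcr : cpl first.toList.reverse s.toList.reverse ≤ s.toList.length := by
      have := cpl_le_right first.toList.reverse s.toList.reverse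
      simpa using this
    omega

-- A's whole for-loop computes the running minimum of common-suffix lengths
lemma foldA_spec (first : String) (rest : List String) (n : Nat)
    (hn : n ≤ first.toList.length) :
    rest.foldl (pvStepA first) (n : Int)
      = ((rest.foldl (fun t s => min t (cpl first.toList.reverse s.toList.reverse)) n : Nat) : Int) := by
  induction rest generalizing n with
  | nil => simp
  | cons s rest' ih =>
    simp only [List.foldl_cons]
    rw [pvStepA_spec first s n hn]
    exact ih _ (by omega)

-- small facts about a foldl of min
lemma fmin_le_init (g : String → Nat) (l : List String) (n : Nat) :
    l.foldl (fun t s => min t (g s)) n ≤ n := by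
  induction l generalizing n with
  | nil => simp
  | cons s l' ih =>
    simp only [List.foldl_cons]
    have := ih (min n (g s))
    omega

lemma fmin_le_mem (g : String → Nat) (l : List String) (n : Nat) (s : String) (hs : s ∈ l) :
    l.foldl (fun t s => min t (g s)) n ≤ g s := by
  induction l generalizing n with
  | nil => simp at hs
  | cons x l' ih =>
    simp only [List.foldl_cons]
    rcases List.mem_cons.mp hs with h | h
    · subst h
      have := fmin_le_init g l' (min n (g s))
      omega
    · exact ih _ h

lemma le_fmin (g : String → Nat) (l : List String) (n k : Nat) (hk : k ≤ n)
    (h : ∀ s ∈ l, k ≤ g s) : k ≤ l.foldl (fun t s => min t (g s)) n := by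
  induction l generalizing n with
  | nil => simpa
  | cons x l' ih =>
    simp only [List.foldl_cons]
    exact ih _ (by have := h x (by simp); omega) (fun s hs => h s (by simp [hs]))

lemma fmin_mem (g : String → Nat) (l : List String) (n : Nat) :
    l.foldl (fun t s => min t (g s)) n = n ∨
      ∃ s ∈ l, l.foldl (fun t s => min t (g s)) n = g s := by
  induction l generalizing n with
  | nil => simp
  | cons x l' ih =>
    simp only [List.foldl_cons]
    rcases ih (min n (g x)) with h | ⟨s, hs, h⟩
    · by_cases hxn : g x < n
      · right; exact ⟨x, by simp, by omega⟩
      · left; omega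
    · right; exact ⟨s, by simp [hs], h⟩

-- casts commute with the min-fold
lemma foldl_min_cast (l : List String) (g : String → Nat) (n : Nat) :
    l.foldl (fun t s => min t ((g s : Nat) : Int)) (n : Int)
      = ((l.foldl (fun t s => min t (g s)) n : Nat) : Int) := by
  induction l generalizing n with
  | nil => simp
  | cons x l' ih =>
    simp only [List.foldl_cons]
    have : min ((n : Nat) : Int) ((g x : Nat) : Int) = ((min n (g x) : Nat) : Int) := by
      omega
    rw [this, ih]

-- characterisation of B's column loop
lemma pvColLoopB_spec (first : String) (rest : List String)
    (L N : Nat)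
    (hLf : L ≤ first.toList.length)
    (hLs : ∀ s ∈ rest, L ≤ s.toList.length)
    (hNL : N ≤ L)
    (hNc : ∀ s ∈ rest, N ≤ cpl first.toList.reverse s.toList.reverse)
    (hNmax : N < L → ∃ s ∈ rest, cpl first.toList.reverse s.toList.reverse = N) :
    ∀ d k, k ≤ N → L - k ≤ d →
      pvColLoopB (first :: rest) first (L : Int) ((k : Int) + 1) (k : Int) = (N : Int) := by
  intro d
  induction d with
  | zero =>
    intro k hk hd
    rw [pvColLoopB, dif_neg (by omega)]
    omega
  | succ d' ih =>
    intro k hk hd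
    by_cases hkL : k < L
    · rw [pvColLoopB, dif_pos (by omega)]
      by_cases hkN : k < N
      · -- column k+1 matches in every string
        rw [if_pos]
        · have harith : ((k : Int) + 1 + 1) = ((k + 1 : Nat) : Int) + 1 := by push_cast; ring
          have harith2 : ((k : Int) + 1) = ((k + 1 : Nat) : Int) := by push_cast; ring
          rw [harith, harith2]
          exact ih (k + 1) (by omega) (by omega)
        · rw [List.all_eq_true]
          intro s hs
          have hneg : -((k : Int) + 1) = -(k : Int) - 1 := by ring
          rcases List.mem_cons.mp hs with h | h
          · simp [h]
          · have hsl : k < s.toList.length := by have := hLs s h; omega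
            have heq : first.toList.reverse[k]? = s.toList.reverse[k]? :=
              cpl_get _ _ k (by have := hNc s h; omega)
            rw [hneg, PySem.Str.pyGet?_eq, PySem.Str.pyGet?_eq,
                PySem.Chars.pyGet?_eq_listPyGet?, PySem.Chars.pyGet?_eq_listPyGet?,
                pyGet_neg_rev s.toList k hsl, pyGet_neg_rev first.toList k (by omega)]
            simp [heq]
      · -- k = N < L: some string mismatches at column k+1; loop returns trim = k = N
        have hkN' : k = N := by omega
        rcases hNmax (by omega) with ⟨s, hs, hcs⟩
        have hsl : k < s.toList.length := by have := hLs s hs; omega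
        have hne : first.toList.reverse[k]? ≠ s.toList.reverse[k]? := by
          have := cpl_ne first.toList.reverse s.toList.reverse
            (by simp only [hcs, List.length_reverse]; omega)
            (by simp only [hcs, List.length_reverse]; omega)
          rwa [hcs, ← hkN'] at this
        rw [if_neg]
        · omega
        · intro hall
          rw [List.all_eq_true] at hall
          have := hall s (by simp [hs])
          have hneg : -((k : Int) + 1) = -(k : Int) - 1 := by ring
          rw [hneg, PySem.Str.pyGet?_eq, PySem.Str.pyGet?_eq,
              PySem.Chars.pyGet?_eq_listPyGet?, PySem.Chars.pyGet?_eq_listPyGet?,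
              pyGet_neg_rev s.toList k hsl, pyGet_neg_rev first.toList k (by omega)] at this
          have h2 : s.toList.reverse[k]? = first.toList.reverse[k]? := by simpa using this
          exact hne h2.symm
    · -- k = L = N: loop exits
      rw [pvColLoopB, dif_neg (by omega)]
      omega

-- the two trim values agree
lemma trim_values_eq (first : String) (rest : List String) :
    rest.foldl (pvStepA first) (PySem.Str.len first)
      = pvColLoopB (first :: rest) first
          ((PySem.List.min? ((first :: rest).map PySem.Str.len) (fun x => x)).getD 0) 1 0 := by
  set g : String → Nat := fun s => cpl first.toList.reverse s.toList.reverse with hg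
  set glen : String → Nat := fun s => s.toList.length with hglen
  set N : Nat := rest.foldl (fun t s => min t (g s)) first.toList.length with hN
  set L : Nat := rest.foldl (fun t s => min t (glen s)) first.toList.length with hL
  -- left side
  have hA : rest.foldl (pvStepA first) (PySem.Str.len first) = (N : Int) := by
    rw [PySem.Str.len_eq, foldA_spec first rest _ (le_refl _)]
  -- the limit
  have hmin : (PySem.List.min? ((first :: rest).map PySem.Str.len) (fun x => x)).getD 0
      = (L : Int) := by
    rw [List.map_cons, PySem.List.min?_id_cons, Option.getD_some]
    calc (rest.map PySem.Str.len).foldl min (PySem.Str.len first)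
        = rest.foldl (fun t s => min t (PySem.Str.len s)) (PySem.Str.len first) := by
          rw [List.foldl_map]
      _ = rest.foldl (fun t s => min t ((glen s : Nat) : Int)) ((first.toList.length : Nat) : Int) := by
          rw [PySem.Str.len_eq]
          congr 1
      _ = (L : Int) := foldl_min_cast rest glen first.toList.length
  -- facts feeding the column-loop characterisation
  have hNL : N ≤ L := by
    apply le_fmin
    · exact fmin_le_init g rest first.toList.length
    · intro s hs
      have h1 : N ≤ g s := fmin_le_mem g rest first.toList.length s hs
      have h2 : g s ≤ glen s := by
        have := cpl_le_right first.toList.reverse s.toList.reverse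
        simpa [hg, hglen] using this
      omega
  have hLf : L ≤ first.toList.length := fmin_le_init glen rest first.toList.length
  have hLs : ∀ s ∈ rest, L ≤ s.toList.length := fun s hs => fmin_le_mem glen rest _ s hs
  have hNc : ∀ s ∈ rest, N ≤ cpl first.toList.reverse s.toList.reverse :=
    fun s hs => fmin_le_mem g rest _ s hs
  have hNmax : N < L → ∃ s ∈ rest, cpl first.toList.reverse s.toList.reverse = N := by
    intro hlt
    rcases fmin_mem g rest first.toList.length with h | ⟨s, hs, h⟩
    · exfalso; rw [← hN] at h; omega
    · exact ⟨s, hs, h.symm⟩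
  rw [hA, hmin]
  have := pvColLoopB_spec first rest L N hLf hLs hNL hNc hNmax L 0 (by omega) (by omega)
  simpa using this.symm

-- ===== VERDICT (by name: the statement is the Claim_ definition above) =====
theorem trim_common_suffixes_spec : Claim_equal_trim_common_suffixes := by
  intro strs max_trim _
  unfold Spec_trim_common_suffixes trim_common_suffixes trim_common_suffixes_alt
  by_cases hlen : strs.length < 2
  · simp [hlen]
  · rw [if_neg hlen, if_neg hlen]
    match strs with
    | [] => rfl
    | first :: rest =>
      simp only
      rw [trim_values_eq first rest]
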